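-- pv_equiv track=rewrite | github.com/ItsRamiz/TEXT-CLARITY-ENHANCER | preprocessing_corpus.py | separate_text_by_pattern
-- ===== SOURCE A (Python) =====
-- def separate_text_by_pattern(text):
--     try:
--         result = []
--         current_chunk = ""
--         lines = text.splitlines()
--
--         for line in lines:
--             if ":" in line:
--                 if current_chunk:
--                     result.append(current_chunk.strip())
--                 current_chunk = line
--             else:
--                 current_chunk += ' ' + line
--
--         if current_chunk:
--             result.append(current_chunk.strip())
--         return result
--     except Exception as e:
--         return text
-- ===== SOURCE B (Python) =====
-- def separate_text_by_pattern(text):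
--     try:
--         lines = text.splitlines()
--         starts = [i for i, l in enumerate(lines) if ":" in l]
--         if lines and (not starts or starts[0] != 0):
--             starts = [0] + starts
--         ends = starts[1:] + [len(lines)]
--         return [" ".join(lines[s:e]).strip() for s, e in zip(starts, ends)]
--     except Exception:
--         return text
-- ===== Notes on version B (the rewrite author's own statement) =====
-- stated objective: alternative
-- what changed: B replaces A's single accumulate-a-string-and-flush-on-boundary pass by staged passes: it first collects the boundary indices (lines containing ':') via enumerate, derives the list of chunk start positions (prepending 0 for a leading non-boundary run), then slices the line list between consecutive starts and joins/strips each slice.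
import Mathlib
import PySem

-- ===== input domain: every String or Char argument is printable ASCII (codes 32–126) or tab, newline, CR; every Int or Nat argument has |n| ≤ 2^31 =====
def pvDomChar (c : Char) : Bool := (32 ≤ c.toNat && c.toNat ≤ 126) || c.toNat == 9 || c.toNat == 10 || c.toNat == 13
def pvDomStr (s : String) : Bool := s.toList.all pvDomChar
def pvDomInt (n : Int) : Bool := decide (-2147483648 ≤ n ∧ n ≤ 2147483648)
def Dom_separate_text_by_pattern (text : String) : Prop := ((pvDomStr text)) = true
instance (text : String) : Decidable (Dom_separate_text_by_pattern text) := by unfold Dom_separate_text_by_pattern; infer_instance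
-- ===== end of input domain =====

-- B replaces A's single accumulate-and-flush pass by staged passes: it first computes the
-- boundary indices (lines containing ':'), derives the chunk start positions, and then
-- slices the line list per chunk; same return value, no speed claim.

-- ===== PORT A =====
-- loop over lines with state (result, current_chunk); the chunk is kept as List Char
-- (Python string concatenation 'current_chunk += " " + line', exact on code points)
def sepA_loop : List String → List String → List Char → List String
  | [], res, cur =>
      if cur ≠ [] then res ++ [String.ofList (PySem.Chars.strip cur)] else res
  | line :: rest, res, cur =>
      if PySem.Str.isIn ":" line then
        sepA_loop rest (if cur ≠ [] then res ++ [String.ofList (PySem.Chars.strip cur)] else res) line.toList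
      else
        sepA_loop rest res (cur ++ ' ' :: line.toList)

def separate_text_by_pattern (text : String) : List String :=
  sepA_loop (PySem.Str.splitlines text) [] []

-- ===== PORT B =====
-- staged: boundary indices from enumerate, prepend a start 0 when the first line is not a
-- boundary (starts.head? ≠ some 0 is Python's 'not starts or starts[0] != 0'), then slice
def separate_text_by_pattern_alt (text : String) : List String :=
  let lines := PySem.Str.splitlines text
  let starts0 := ((PySem.List.enumerate lines 0).filter (fun p => PySem.Str.isIn ":" p.2)).map (fun p => p.1)
  let starts := if lines ≠ [] ∧ starts0.head? ≠ some 0 then (0 : Int) :: starts0 else starts0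
  let ends := PySem.List.slice starts (some 1) none ++ [PySem.List.len lines]
  (starts.zip ends).map (fun p =>
    PySem.Str.strip (PySem.Str.join " " (PySem.List.slice lines (some p.1) (some p.2))))

-- ===== PRECONDITION & SPEC =====
def Spec_separate_text_by_pattern (text : String) (out : List String) : Prop := out = separate_text_by_pattern_alt text
instance (text : String) (out : List String) : Decidable (Spec_separate_text_by_pattern text out) := by unfold Spec_separate_text_by_pattern; infer_instance

-- ===== CLAIM (what is proved, stated in full; the proofs are below) =====
def Claim_equal_separate_text_by_pattern : Prop := ∀ (text : String), Dom_separate_text_by_pattern text → Spec_separate_text_by_pattern text (separate_text_by_pattern text)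

-- ===== LEMMAS AND PROOFS =====

-- a line that is NOT a boundary (no ':')
def pvNC (l : String) : Bool := !(PySem.Str.isIn ":" l)

-- the chunk decomposition both programs compute: each group is a boundary line (or the
-- leading non-boundary run's first line) followed by the non-boundary lines after it
def groupsOf : List String → List (List String)
  | [] => []
  | l :: rest => (l :: rest.takeWhile pvNC) :: groupsOf (rest.dropWhile pvNC)
  termination_by xs => xs.length
  decreasing_by
    have := List.length_dropWhile_le pvNC rest
    simp; omega

-- B's per-group output
def fB (g : List String) : String := PySem.Str.strip (PySem.Str.join " " g)

-- the rendered chunk of a group: ' '.join(g) on code points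
def joinC (g : List String) : List Char :=
  PySem.Chars.join [' '] (g.map String.toList)

lemma joinC_singleton (l : String) : joinC [l] = l.toList := by
  simp [joinC, PySem.Chars.join_singleton]

lemma joinC_cons (a : String) (rest : List String) (h : rest ≠ []) :
    joinC (a :: rest) = a.toList ++ ' ' :: joinC rest := by
  cases rest with
  | nil => exact absurd rfl h
  | cons b t => simp [joinC, PySem.Chars.join_cons_cons]

lemma joinC_append_singleton (g : List String) (hg : g ≠ []) (l : String) :
    joinC (g ++ [l]) = joinC g ++ ' ' :: l.toList := by
  induction g with
  | nil => exact absurd rfl hg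
  | cons a t ih =>
    cases t with
    | nil => rw [List.cons_append, List.nil_append, joinC_cons a [l] (by simp),
        joinC_singleton, joinC_singleton]
    | cons b t' =>
      rw [List.cons_append, joinC_cons a ((b :: t') ++ [l]) (by simp),
        ih (by simp), joinC_cons a (b :: t') (by simp)]
      simp

lemma strip_space_cons (xs : List Char) :
    PySem.Chars.strip (' ' :: xs) = PySem.Chars.strip xs := by
  simp [PySem.Chars.strip, PySem.Chars.lstrip, PySem.Chars.isspace]

-- the chunk A carries renders to B's per-group output
lemma chunk_renders (g : List String) (cur : List Char)
    (hc : cur = joinC g ∨ cur = ' ' :: joinC g) :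
    String.ofList (PySem.Chars.strip cur) = fB g := by
  have hB : (fB g).toList = PySem.Chars.strip (joinC g) := by
    simp [fB, PySem.Str.toList_strip, PySem.Str.toList_join, joinC]
  have : PySem.Chars.strip cur = (fB g).toList := by
    rcases hc with h | h <;> rw [h, hB]
    rw [strip_space_cons]
  rw [this]
  exact String.ofList_toList

lemma colon_line_ne_nil {l : String} (h : PySem.Str.isIn ":" l = true) :
    l.toList ≠ [] := by
  rcases (PySem.Str.isIn_iff_infix ":" l).mp h with ⟨s, t, hst⟩
  intro hnil
  rw [hnil] at hst
  simpa using congrArg List.length hst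

-- ========== A's loop computes the groups ==========

lemma loopA (lines : List String) :
    ∀ (res g : List String) (cur : List Char),
      g ≠ [] → cur ≠ [] → (cur = joinC g ∨ cur = ' ' :: joinC g) →
      sepA_loop lines res cur
        = res ++ ((g ++ lines.takeWhile pvNC) :: groupsOf (lines.dropWhile pvNC)).map fB := by
  induction lines with
  | nil =>
    intro res g cur hg hcur hc
    simp [sepA_loop, hcur, groupsOf, chunk_renders g cur hc]
  | cons line rest ih =>
    intro res g cur hg hcur hc
    by_cases hcol : PySem.Str.isIn ":" line = true
    · have hnc : pvNC line = false := by simp only [pvNC, hcol, Bool.not_true]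
      have hres : (if cur ≠ [] then res ++ [String.ofList (PySem.Chars.strip cur)] else res)
          = res ++ [fB g] := by simp [hcur, chunk_renders g cur hc]
      simp only [sepA_loop, hcol, if_pos, hres, List.takeWhile_cons, hnc,
        List.dropWhile_cons, Bool.false_eq_true, if_false]
      rw [ih (res ++ [fB g]) [line] line.toList (by simp)
        (colon_line_ne_nil hcol) (Or.inl (joinC_singleton line).symm)]
      rw [groupsOf]
      simp
    · have hcol' : PySem.Str.isIn ":" line = false := by simpa using hcol
      have hnc : pvNC line = true := by simp only [pvNC, hcol', Bool.not_false]
      have hc' : cur ++ ' ' :: line.toList = joinC (g ++ [line])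
          ∨ cur ++ ' ' :: line.toList = ' ' :: joinC (g ++ [line]) := by
        rw [joinC_append_singleton g hg line]
        rcases hc with h | h
        · exact Or.inl (by rw [h])
        · exact Or.inr (by rw [h]; simp)
      simp only [sepA_loop, hcol', Bool.false_eq_true, if_false, List.takeWhile_cons, hnc,
        List.dropWhile_cons, if_pos]
      rw [ih res (g ++ [line]) (cur ++ ' ' :: line.toList) (by simp) (by simp [hcur]) hc']
      simp

lemma A_eq_groups (lines : List String) :
    sepA_loop lines [] [] = (groupsOf lines).map fB := by
  cases lines with
  | nil => simp [sepA_loop, groupsOf]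
  | cons line rest =>
    rw [groupsOf]
    by_cases hcol : PySem.Str.isIn ":" line = true
    · simp only [sepA_loop, hcol, if_pos, ne_eq, not_true_eq_false, ite_false]
      rw [loopA rest [] [line] line.toList (by simp)
        (colon_line_ne_nil hcol) (Or.inl (joinC_singleton line).symm)]
      simp
    · have hcol' : PySem.Str.isIn ":" line = false := by simpa using hcol
      simp only [sepA_loop, hcol', Bool.false_eq_true, if_false, List.nil_append]
      rw [loopA rest [] [line] (' ' :: line.toList) (by simp) (by simp)
        (Or.inr (by rw [joinC_singleton]))]
      simp

-- ========== B's staged computation computes the groups ==========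

def startsOf (xs : List String) : List Int :=
  ((PySem.List.enumerate xs 0).filter (fun p => PySem.Str.isIn ":" p.2)).map (fun p => p.1)

def startsOf' (xs : List String) : List Int :=
  if xs ≠ [] ∧ (startsOf xs).head? ≠ some 0 then (0 : Int) :: startsOf xs else startsOf xs

def renderB (xs : List String) (s : List Int) : List String :=
  (s.zip (s.drop 1 ++ [PySem.List.len xs])).map (fun p =>
    fB (PySem.List.slice xs (some p.1) (some p.2)))

-- boundary indices of xs when enumeration starts at s
def mst (xs : List String) (s : Int) : List Int :=
  ((PySem.List.enumerate xs s).filter (fun p => PySem.Str.isIn ":" p.2)).map (fun p => p.1)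

lemma startsOf_eq_mst (xs : List String) : startsOf xs = mst xs 0 := rfl

lemma mst_nil (s : Int) : mst [] s = [] := rfl

lemma mst_cons (x : String) (xs : List String) (s : Int) :
    mst (x :: xs) s
      = (if PySem.Str.isIn ":" x then [s] else []) ++ mst xs (s + 1) := by
  simp only [mst, PySem.List.enumerate_cons, List.filter_cons]
  split_ifs <;> simp

lemma mst_shift (xs : List String) : ∀ (s t : Int), mst xs (s + t) = (mst xs s).map (· + t) := by
  induction xs with
  | nil => intro s t; simp [mst_nil]
  | cons x xs ih =>
    intro s t
    rw [mst_cons, mst_cons, List.map_append]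
    have h1 : s + t + 1 = (s + 1) + t := by ring
    rw [h1, ih (s + 1) t]
    split_ifs <;> simp

lemma mst_of_all_nc (xs : List String) (h : ∀ x ∈ xs, pvNC x = true) (s : Int) :
    mst xs s = [] := by
  induction xs generalizing s with
  | nil => exact mst_nil s
  | cons x xs ih =>
    have hx : PySem.Str.isIn ":" x = false := by
      have := h x (by simp)
      simpa [pvNC] using this
    rw [mst_cons, hx]
    simp [ih (fun y hy => h y (by simp [hy]))]

lemma mst_append (xs ys : List String) (s : Int) :
    mst (xs ++ ys) s = mst xs s ++ mst ys (s + xs.length) := by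
  simp [mst, PySem.List.enumerate_append]

lemma mst_nonneg (xs : List String) : ∀ a ∈ startsOf xs, 0 ≤ a := by
  intro a ha
  simp only [startsOf, List.mem_map, List.mem_filter] at ha
  obtain ⟨p, ⟨hp, _⟩, hfst⟩ := ha
  rw [PySem.List.mem_enumerate_iff] at hp
  obtain ⟨k, hk, rfl⟩ := hp
  simp at hfst
  omega

-- startsOf of the group decomposition
lemma startsOf_decomp (l : String) (run rest' : List String)
    (hrun : ∀ x ∈ run, pvNC x = true) :
    startsOf ((l :: run) ++ rest')
      = (if PySem.Str.isIn ":" l then [(0 : Int)] else [])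
          ++ (startsOf rest').map (· + ((l :: run).length : Int)) := by
  rw [startsOf_eq_mst, mst_append, mst_cons, mst_of_all_nc run hrun (0 + 1),
    mst_shift rest' 0 ((l :: run).length : Int), startsOf_eq_mst]
  simp

lemma startsOf'_decomp (l : String) (run rest' : List String)
    (hrun : ∀ x ∈ run, pvNC x = true)
    (hrest : rest' = [] ∨ ∃ c t, rest' = c :: t ∧ PySem.Str.isIn ":" c = true) :
    startsOf' ((l :: run) ++ rest')
      = 0 :: (startsOf rest').map (· + ((l :: run).length : Int)) := by
  rw [startsOf']
  by_cases hcol : PySem.Str.isIn ":" l = true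
  · rw [startsOf_decomp l run rest' hrun, hcol]
    simp
  · have hcol' : PySem.Str.isIn ":" l = false := by simpa using hcol
    rw [startsOf_decomp l run rest' hrun, hcol']
    simp only [List.nil_append, Bool.false_eq_true, ite_false]
    rw [if_pos]
    constructor
    · simp
    · rcases hrest with rfl | ⟨c, t, rfl, hc⟩
      · simp [startsOf]
      · rw [startsOf_eq_mst, mst_cons, hc]
        intro h
        have := congrArg (fun o => o.getD 1) h
        simp at this
        omega

-- head of startsOf when the first line is a boundary
lemma startsOf'_of_head_colon (c : String) (t : List String)
    (hc : PySem.Str.isIn ":" c = true) :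
    startsOf' (c :: t) = startsOf (c :: t) := by
  rw [startsOf']
  rw [if_neg]
  intro ⟨_, hh⟩
  rw [startsOf_eq_mst, mst_cons, hc] at hh
  simp at hh

lemma nc_head_dropWhile (l : List String) (c : String) (t : List String)
    (h : l.dropWhile pvNC = c :: t) : pvNC c = false := by
  induction l with
  | nil => simp at h
  | cons x xs ih =>
    rw [List.dropWhile_cons] at h
    by_cases hx : pvNC x = true
    · rw [if_pos hx] at h; exact ih h
    · rw [if_neg hx] at h
      cases h
      simpa using hx

-- slicing past a prefix of known length
lemma slice_append_shift (pre ys : List String) (a b : Int) (ha : 0 ≤ a) (hb : 0 ≤ b) :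
    PySem.List.slice (pre ++ ys) (some (a + (pre.length : Int))) (some (b + (pre.length : Int)))
      = PySem.List.slice ys (some a) (some b) := by
  rw [PySem.List.slice_toNat _ (by omega) (by omega), PySem.List.slice_toNat _ ha hb]
  have h1 : (a + (pre.length : Int)).toNat = pre.length + a.toNat := by omega
  have h2 : (b + (pre.length : Int)).toNat - (a + (pre.length : Int)).toNat
      = b.toNat - a.toNat := by omega
  rw [h2, h1, List.drop_length_add_append]

lemma slice_zero_len (xs pre ys : List String) (h : xs = pre ++ ys) :
    PySem.List.slice xs (some 0) (some (pre.length : Int)) = pre := by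
  rw [PySem.List.slice_toNat _ le_rfl (by omega)]
  simp [h]

lemma B_eq_groups (lines : List String) :
    renderB lines (startsOf' lines) = (groupsOf lines).map fB := by
  induction lines using groupsOf.induct with
  | case1 => simp [renderB, startsOf', startsOf, groupsOf]
  | case2 l rest ih =>
    obtain ⟨run, hrunDef⟩ : ∃ r, r = rest.takeWhile pvNC := ⟨_, rfl⟩
    obtain ⟨rest', hrestDef⟩ : ∃ r, r = rest.dropWhile pvNC := ⟨_, rfl⟩
    rw [← hrestDef] at ih
    have hsplit : l :: rest = (l :: run) ++ rest' := by
      rw [hrunDef, hrestDef]; simp [List.takeWhile_append_dropWhile]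
    have hgroups : groupsOf (l :: rest) = (l :: run) :: groupsOf rest' := by
      rw [groupsOf, ← hrunDef, ← hrestDef]
    have hrun : ∀ x ∈ run, pvNC x = true := by
      rw [hrunDef]; exact fun x hx => List.mem_takeWhile_imp hx
    have hrest : rest' = [] ∨ ∃ c t, rest' = c :: t ∧ PySem.Str.isIn ":" c = true := by
      cases hre : rest' with
      | nil => exact Or.inl rfl
      | cons c t =>
        refine Or.inr ⟨c, t, rfl, ?_⟩
        have hd : rest.dropWhile pvNC = c :: t := by rw [← hrestDef]; exact hre
        have := nc_head_dropWhile rest c t hd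
        simpa [pvNC] using this
    rw [hgroups, List.map_cons, hsplit, startsOf'_decomp l run rest' hrun hrest]
    cases hrest with
    | inl hnil =>
      subst hnil
      simp only [renderB, groupsOf, startsOf, PySem.List.enumerate_nil,
        List.filter_nil, List.map_nil, List.append_nil, List.drop_one, List.tail_cons,
        List.nil_append, List.zip_cons_cons, List.zip_nil_right, List.map_cons,
        PySem.List.len_eq]
      rw [List.cons_eq_cons]
      refine ⟨?_, rfl⟩
      have h2 : PySem.List.slice (l :: run) (some 0) (some ((l :: run).length : Int))
          = l :: run := slice_zero_len (l :: run) (l :: run) [] (by simp)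
      rw [h2]
    | inr hcons =>
      obtain ⟨c, t, hre, hc⟩ := hcons
      have hS' : ∃ S', startsOf rest' = 0 :: S' := by
        rw [hre, startsOf_eq_mst, mst_cons, hc]
        exact ⟨mst t (0 + 1), by simp⟩
      obtain ⟨S', hS'⟩ := hS'
      rw [hS', renderB]
      simp only [List.map_cons, List.drop_one, List.tail_cons, List.cons_append,
        List.zip_cons_cons, List.map_cons]
      rw [List.cons_eq_cons]
      constructor
      · rw [zero_add, slice_zero_len (l :: (run ++ rest')) (l :: run) rest' (by simp)]
      · rw [show l :: (run ++ rest') = (l :: run) ++ rest' from rfl]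
        have hmapfold : ((0 : Int) + ((l :: run).length : Int))
            :: S'.map (· + ((l :: run).length : Int))
            = (0 :: S').map (· + ((l :: run).length : Int)) := by simp
        have hlen : PySem.List.len ((l :: run) ++ rest')
            = (rest'.length : Int) + ((l :: run).length : Int) := by
          simp [PySem.List.len_eq]; ring
        have htail : S'.map (· + ((l :: run).length : Int))
              ++ [PySem.List.len ((l :: run) ++ rest')]
            = (S' ++ [(rest'.length : Int)]).map (· + ((l :: run).length : Int)) := by
          rw [List.map_append, hlen]; simp
        rw [hmapfold, htail, List.zip_map, List.map_map]
        have hnonneg : ∀ a ∈ (0 : Int) :: S', 0 ≤ a := by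
          rw [← hS']; exact mst_nonneg rest'
        have hzip : ∀ p ∈ ((0 : Int) :: S').zip (S' ++ [(rest'.length : Int)]),
            ((fun p => fB (PySem.List.slice ((l :: run) ++ rest') (some p.1) (some p.2)))
              ∘ (Prod.map (· + ((l :: run).length : Int)) (· + ((l :: run).length : Int)))) p
            = (fun p => fB (PySem.List.slice rest' (some p.1) (some p.2))) p := by
          intro p hp
          have hp1 : 0 ≤ p.1 := hnonneg p.1 (List.of_mem_zip hp).1
          have hp2 : 0 ≤ p.2 := by
            rcases List.mem_append.mp (List.of_mem_zip hp).2 with h | h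
            · exact hnonneg p.2 (List.mem_cons_of_mem _ h)
            · simp at h; omega
          simp only [Function.comp, Prod.map]
          rw [slice_append_shift (l :: run) rest' p.1 p.2 hp1 hp2]
        rw [List.map_congr_left hzip]
        have hstS : startsOf' rest' = 0 :: S' := by
          have h := startsOf'_of_head_colon c t hc
          rw [← hre] at h
          rw [h, hS']
        have hRB : renderB rest' (startsOf' rest')
            = (((0 : Int) :: S').zip (S' ++ [(rest'.length : Int)])).map
                (fun p => fB (PySem.List.slice rest' (some p.1) (some p.2))) := by
          rw [renderB, hstS]
          simp [PySem.List.len_eq]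
        rw [← hRB, ih]

lemma alt_eq_render (text : String) :
    separate_text_by_pattern_alt text
      = renderB (PySem.Str.splitlines text) (startsOf' (PySem.Str.splitlines text)) := by
  simp only [separate_text_by_pattern_alt, renderB, startsOf', startsOf, fB,
    PySem.List.slice_from_one, List.drop_one]

-- ===== VERDICT (by name: the statement is the Claim_ definition above) =====
theorem separate_text_by_pattern_spec : Claim_equal_separate_text_by_pattern := by
  intro text _
  show separate_text_by_pattern text = separate_text_by_pattern_alt text
  rw [alt_eq_render, B_eq_groups]
  exact A_eq_groups _
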